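-- pv_equiv track=rewrite | github.com/lgastako/pygatsby | main.py | format_history_with_restrictions
-- ===== SOURCE A (Python) =====
-- def format_history(pairs):
--     return "\n\n".join(map(lambda pair: f"{pair[0]}: {pair[1]}", pairs))
--
-- def format_history_with_restrictions(max_length, pairs):
--     result = "<history not available>"
--     for n in range(len(pairs)):
--         formatted = format_history(pairs)
--         if len(formatted) <= max_length:
--             result = formatted
--             break
--         pairs = pairs[1:]  # TODO is this right or do we want -1?
--     return result
-- ===== SOURCE B (Python) =====
-- def format_history_with_restrictions(max_length, pairs):
--     # Precompute each pair's formatted length once; a running suffix length replaces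
--     # A's repeated re-joining, so only the final winning suffix is formatted.
--     item_lens = [len(q) + len(a) + 2 for q, a in pairs]
--     length = sum(item_lens) + 2 * (len(pairs) - 1)
--     for i, il in enumerate(item_lens):
--         if length <= max_length:
--             return "\n\n".join(f"{q}: {a}" for q, a in pairs[i:])
--         length -= il + 2
--     return "<history not available>"
-- ===== Notes on version B (the rewrite author's own statement) =====
-- stated objective: faster
-- what changed: B precomputes each pair's formatted length once and maintains a running suffix length while scanning forward, joining only the one winning suffix, instead of A's re-formatting the whole remaining list on every iteration.
import Mathlib
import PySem

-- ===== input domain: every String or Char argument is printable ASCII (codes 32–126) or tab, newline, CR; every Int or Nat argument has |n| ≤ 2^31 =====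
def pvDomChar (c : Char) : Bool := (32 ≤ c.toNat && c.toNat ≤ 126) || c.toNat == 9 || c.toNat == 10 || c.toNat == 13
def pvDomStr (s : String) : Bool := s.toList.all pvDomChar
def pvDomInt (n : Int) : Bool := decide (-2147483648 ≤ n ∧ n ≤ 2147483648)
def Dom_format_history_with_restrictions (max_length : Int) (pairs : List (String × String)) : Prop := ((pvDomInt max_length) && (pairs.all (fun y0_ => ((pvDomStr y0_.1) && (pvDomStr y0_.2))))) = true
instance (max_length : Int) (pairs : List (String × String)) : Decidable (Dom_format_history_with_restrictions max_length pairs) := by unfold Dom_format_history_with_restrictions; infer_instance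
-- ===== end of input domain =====

-- B replaces A's re-join of every suffix by precomputed per-pair lengths and a
-- running suffix length, formatting only the winning suffix once (objective: faster).

-- ===== PORT A =====
-- '"\n\n".join(map(lambda pair: f"{pair[0]}: {pair[1]}", pairs))' on code points
def pvFmt (pairs : List (String × String)) : List Char :=
  PySem.Chars.join ['\n', '\n'] (pairs.map (fun pair => pair.1.toList ++ [':', ' '] ++ pair.2.toList))

-- the loop 'for n in range(len(pairs)): … break … pairs = pairs[1:]' as fuel recursion
-- (fuel = the fixed iteration count len(pairs); break returns, exhausted fuel yields result)
def pvALoop (max_length : Int) : Nat → List (String × String) → String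
  | 0, _ => "<history not available>"
  | fuel + 1, pairs =>
      let formatted := pvFmt pairs
      if (PySem.Chars.len formatted : Int) ≤ max_length then String.ofList formatted
      else pvALoop max_length fuel (PySem.List.slice pairs (some 1) none)

def format_history_with_restrictions (max_length : Int) (pairs : List (String × String)) : String :=
  pvALoop max_length pairs.length pairs

-- ===== PORT B =====
-- '[len(q) + len(a) + 2 for q, a in pairs]'
def pvItemLens (pairs : List (String × String)) : List Int :=
  pairs.map (fun p => (PySem.Str.len p.1 : Int) + (PySem.Str.len p.2 : Int) + 2)

-- 'for i, il in enumerate(item_lens): …' with the running suffix length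
def pvBLoop (max_length : Int) (pairs : List (String × String)) : List Int → Int → Nat → String
  | [], _, _ => "<history not available>"
  | il :: rest, length, i =>
      if length ≤ max_length then String.ofList (pvFmt (PySem.List.slice pairs (some (i : Int)) none))
      else pvBLoop max_length pairs rest (length - (il + 2)) (i + 1)

def format_history_with_restrictions_alt (max_length : Int) (pairs : List (String × String)) : String :=
  let item_lens := pvItemLens pairs
  pvBLoop max_length pairs item_lens (item_lens.sum + 2 * ((pairs.length : Int) - 1)) 0

-- ===== PRECONDITION & SPEC =====
def Spec_format_history_with_restrictions (max_length : Int) (pairs : List (String × String)) (out : String) : Prop := out = format_history_with_restrictions_alt max_length pairs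
instance (max_length : Int) (pairs : List (String × String)) (out : String) : Decidable (Spec_format_history_with_restrictions max_length pairs out) := by unfold Spec_format_history_with_restrictions; infer_instance

-- ===== CLAIM (what is proved, stated in full; the proofs are below) =====
def Claim_equal_format_history_with_restrictions : Prop := ∀ (max_length : Int) (pairs : List (String × String)), Dom_format_history_with_restrictions max_length pairs → Spec_format_history_with_restrictions max_length pairs (format_history_with_restrictions max_length pairs)

-- ===== LEMMAS AND PROOFS =====

-- the arithmetic suffix length B maintains
def pvI (pairs : List (String × String)) : Int :=
  (pvItemLens pairs).sum + 2 * ((pairs.length : Int) - 1)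

-- on a nonempty list, B's arithmetic length is the length of A's joined string
theorem pvFmt_len (pairs : List (String × String)) (h : pairs ≠ []) :
    ((pvFmt pairs).length : Int) = pvI pairs := by
  induction pairs with
  | nil => simp at h
  | cons p rest ih =>
    cases rest with
    | nil =>
      simp [pvFmt, pvI, pvItemLens, PySem.Chars.join_singleton]
      ring
    | cons q rest' =>
      have hne : (q :: rest' : List (String × String)) ≠ [] := by simp
      have hrec := ih hne
      simp [pvFmt, PySem.Chars.join_cons_cons] at hrec ⊢
      simp [pvI, pvItemLens] at hrec ⊢
      omega

theorem pvI_step (p : String × String) (rest : List (String × String)) :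
    pvI (p :: rest) - (((p.1.length : Int) + (p.2.length : Int) + 2) + 2) = pvI rest := by
  simp [pvI, pvItemLens]
  ring

theorem pvLoop_eq (max_length : Int) (suffix : List (String × String)) :
    ∀ (pairs0 : List (String × String)) (i : Nat), pairs0.drop i = suffix →
    pvBLoop max_length pairs0 (pvItemLens suffix) (pvI suffix) i =
      pvALoop max_length suffix.length suffix := by
  induction suffix with
  | nil => intro pairs0 i h; simp [pvItemLens, pvBLoop, pvALoop]
  | cons p rest ih =>
    intro pairs0 i h
    have hslice : PySem.List.slice pairs0 (some (i : Int)) none = p :: rest := by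
      rw [PySem.List.slice_from_natCast, h]
    have htail : PySem.List.slice (p :: rest) (some 1) none = rest := by
      rw [PySem.List.slice_from_one]; rfl
    have hdrop : pairs0.drop (i + 1) = rest := by
      rw [← List.tail_drop, h]; rfl
    have hlen : ((pvFmt (p :: rest)).length : Int) = pvI (p :: rest) :=
      pvFmt_len _ (by simp)
    show pvBLoop max_length pairs0
        (((PySem.Str.len p.1 : Int) + (PySem.Str.len p.2 : Int) + 2) :: pvItemLens rest)
        (pvI (p :: rest)) i = pvALoop max_length (rest.length + 1) (p :: rest)
    rw [pvBLoop, pvALoop, htail]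
    by_cases hc : pvI (p :: rest) ≤ max_length
    · simp [hc, hslice, PySem.Chars.len_eq, hlen]
    · simp [hc, PySem.Chars.len_eq, hlen]
      rw [pvI_step p rest]
      exact ih pairs0 (i + 1) hdrop

-- ===== VERDICT (by name: the statement is the Claim_ definition above) =====
theorem format_history_with_restrictions_spec : Claim_equal_format_history_with_restrictions := by
  intro max_length pairs _
  unfold Spec_format_history_with_restrictions
  unfold format_history_with_restrictions format_history_with_restrictions_alt
  exact (pvLoop_eq max_length pairs pairs 0 (by simp)).symm
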